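-- pv_equiv track=rewrite | github.com/ahfpca/CD_Python_RegistrationForm | server.py | charCheckPassword
-- ===== SOURCE A (Python) =====
-- def charCheckPassword(pwd):
--     result = True
--     upper = 0
--     lower = 0
--     number = 0
--
--     for c in pwd:
--         if c.isupper():
--             upper += 1
--         if c.islower():
--             lower += 1
--         if c.isnumeric():
--             number += 1
--
--     if upper == 0 or lower == 0 or number == 0:
--         return False
--
--     return result
-- ===== SOURCE B (Python) =====
-- def charCheckPassword(pwd):
--     return (any(c.isupper() for c in pwd)
--             and any(c.islower() for c in pwd)
--             and any(c.isnumeric() for c in pwd))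
-- ===== Notes on version B (the rewrite author's own statement) =====
-- stated objective: idiomatic
-- what changed: Replaced the single counting loop over three counters with three independent short-circuiting any() existence scans, one per character class; the scans stop at the first match and run in C-level generator machinery instead of maintaining Python-level counters.
import Mathlib
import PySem

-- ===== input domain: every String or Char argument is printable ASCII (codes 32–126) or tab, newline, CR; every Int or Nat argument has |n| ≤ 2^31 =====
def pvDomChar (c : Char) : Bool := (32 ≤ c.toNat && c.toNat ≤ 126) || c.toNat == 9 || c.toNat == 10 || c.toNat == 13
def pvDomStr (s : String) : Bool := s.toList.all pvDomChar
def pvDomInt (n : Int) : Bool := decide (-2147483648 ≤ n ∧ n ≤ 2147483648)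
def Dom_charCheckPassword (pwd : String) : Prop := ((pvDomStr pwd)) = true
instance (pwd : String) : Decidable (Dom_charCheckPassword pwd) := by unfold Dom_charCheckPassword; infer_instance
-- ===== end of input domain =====

-- B replaces A's single three-counter counting loop by three independent short-circuiting
-- existence scans (any per character class); same values, idiomatic decomposition.
-- On the printable-ASCII domain, c.isnumeric() coincides with PySem.Chars.isdigit.

-- ===== PORT A =====
def charCheckPassword (pwd : String) : Bool :=
  let result := true
  let s := pwd.toList.foldl
    (fun (acc : Int × Int × Int) c =>
      let (upper, lower, number) := acc
      let upper := if PySem.Chars.isupper c then upper + 1 else upper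
      let lower := if PySem.Chars.islower c then lower + 1 else lower
      let number := if PySem.Chars.isdigit c then number + 1 else number
      (upper, lower, number))
    (0, 0, 0)
  if s.1 = 0 ∨ s.2.1 = 0 ∨ s.2.2 = 0 then false
  else result

-- ===== PORT B =====
def charCheckPassword_alt (pwd : String) : Bool :=
  pwd.toList.any PySem.Chars.isupper
    && pwd.toList.any PySem.Chars.islower
    && pwd.toList.any PySem.Chars.isdigit

-- ===== PRECONDITION & SPEC =====
def Spec_charCheckPassword (pwd : String) (out : Bool) : Prop := out = charCheckPassword_alt pwd
instance (pwd : String) (out : Bool) : Decidable (Spec_charCheckPassword pwd out) := by unfold Spec_charCheckPassword; infer_instance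

-- ===== CLAIM (what is proved, stated in full; the proofs are below) =====
def Claim_equal_charCheckPassword : Prop := ∀ (pwd : String), Dom_charCheckPassword pwd → Spec_charCheckPassword pwd (charCheckPassword pwd)

-- ===== LEMMAS AND PROOFS =====

-- The counting fold's components are the initial values plus the respective countP.
theorem pv_fold_counts (l : List Char) (u lo n : Int) :
    l.foldl
      (fun (acc : Int × Int × Int) c =>
        let (upper, lower, number) := acc
        let upper := if PySem.Chars.isupper c then upper + 1 else upper
        let lower := if PySem.Chars.islower c then lower + 1 else lower
        let number := if PySem.Chars.isdigit c then number + 1 else number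
        (upper, lower, number))
      (u, lo, n)
    = (u + l.countP PySem.Chars.isupper,
       lo + l.countP PySem.Chars.islower,
       n + l.countP PySem.Chars.isdigit) := by
  induction l generalizing u lo n with
  | nil => simp
  | cons c cs ih =>
    simp only [List.foldl_cons, List.countP_cons, ih]
    split_ifs <;> simp_all [Prod.ext_iff] <;> push_cast <;> omega

theorem pv_count0_iff (l : List Char) (p : Char → Bool) :
    ((0 : Int) + l.countP p = 0) = (l.any p = false) := by
  simp [List.countP_eq_zero, List.any_eq_false]

-- ===== VERDICT (by name: the statement is the Claim_ definition above) =====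
theorem charCheckPassword_spec : Claim_equal_charCheckPassword := by
  intro pwd _
  unfold Spec_charCheckPassword charCheckPassword charCheckPassword_alt
  simp only [pv_fold_counts, pv_count0_iff]
  cases h1 : pwd.toList.any PySem.Chars.isupper <;>
    cases h2 : pwd.toList.any PySem.Chars.islower <;>
      cases h3 : pwd.toList.any PySem.Chars.isdigit <;> simp
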